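-- pv_equiv track=rewrite | github.com/hovsept/RL-BATT-DDPG | OutputFeedback_RL/DDA.py | pre_set
-- ===== SOURCE A (Python) =====
-- def pre(state, ell_seq_trajectory):
--     #Returns set of ell-sequences that transition to state in one step
--     ell = len(state)
--     pre_state = set()
--     for s in ell_seq_trajectory:
--         if s[1:] == state[:ell-1]:
--             pre_state.add(s)
--     return pre_state
--
-- def pre_set(state, ell_seq_trajectory):
--     #Returns set of ell-sequences that transition to state in any number of steps
--     pre_state = pre(state,ell_seq_trajectory)
--     pre_done = {state}
--     # pre_old = pre_state
--     while True:
--         for s in pre_state: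
--             if s not in pre_done:
--                 # pre_old = pre_state
--                 pre_state = pre_state.union(pre(s,ell_seq_trajectory - pre_state))
--                 pre_done.add(s)
--
--         if pre_state.union({state}) == pre_done:
--             break
--     return pre_state
-- ===== SOURCE B (Python) =====
-- def pre_set(state, ell_seq_trajectory):
--     # Index each sequence s under its suffix key s[1:], then one BFS pass:
--     # predecessors of v are exactly index[v[:-1]].
--     index = {}
--     for s in ell_seq_trajectory:
--         index.setdefault(s[1:], []).append(s)
--     out = []
--     seen = set()
--     for s in index.get(state[:-1], []):
--         if s not in seen:
--             seen.add(s)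
--             out.append(s)
--     i = 0
--     while i < len(out):
--         v = out[i]
--         i += 1
--         for s in index.get(v[:-1], []):
--             if s not in seen:
--                 seen.add(s)
--                 out.append(s)
--     return set(out)
-- ===== Notes on version B (the rewrite author's own statement) =====
-- stated objective: faster
-- what changed: A saturates by repeatedly re-scanning the whole trajectory (a fresh pre() pass over ell_seq_trajectory - pre_state for each newly processed element, plus a full set-equality test per outer round); B builds a dict indexing each sequence under its suffix key s[1:] once and then runs a single BFS over a queue, reading predecessors of v straight from index[v[:-1]].
import Mathlib
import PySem

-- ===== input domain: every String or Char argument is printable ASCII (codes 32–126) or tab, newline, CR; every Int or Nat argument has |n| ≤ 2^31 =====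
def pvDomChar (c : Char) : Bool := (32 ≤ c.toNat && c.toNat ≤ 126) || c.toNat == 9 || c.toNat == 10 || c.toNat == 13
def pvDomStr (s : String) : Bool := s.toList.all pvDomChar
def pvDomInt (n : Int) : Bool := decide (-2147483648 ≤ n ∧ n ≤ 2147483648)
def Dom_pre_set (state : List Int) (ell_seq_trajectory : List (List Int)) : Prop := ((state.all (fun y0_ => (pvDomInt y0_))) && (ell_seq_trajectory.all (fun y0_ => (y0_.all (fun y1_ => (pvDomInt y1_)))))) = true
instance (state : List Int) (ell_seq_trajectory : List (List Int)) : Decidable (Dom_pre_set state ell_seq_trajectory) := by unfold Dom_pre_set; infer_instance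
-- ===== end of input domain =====

-- B replaces A's repeated re-scans of the trajectory (a fresh `pre` pass and a set-equality
-- test per saturation round) by a suffix-keyed dict index and a single BFS queue pass;
-- the returned set is proved identical (as the same list on the Lean side).

-- ===== PORT A =====
def preA (state : List Int) (ell_seq_trajectory : List (List Int)) : List (List Int) :=
  ell_seq_trajectory.foldl
    (fun pre_state s =>
      if PySem.List.slice s (some 1) none
          = PySem.List.slice state none (some ((state.length : Int) - 1)) then
        PySem.Set.add pre_state s
      else pre_state)
    PySem.Set.empty

def preSetStep (traj : List (List Int)) (p : List (List Int) × List (List Int)) (s : List Int) :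
    List (List Int) × List (List Int) :=
  if PySem.Set.contains p.2 s then p
  else (PySem.Set.union p.1 (preA s (PySem.Set.diff traj p.1)), PySem.Set.add p.2 s)

def preSetLoop (traj : List (List Int)) (state : List Int) :
    Nat → List (List Int) → List (List Int) → List (List Int)
  | 0, ps, _ => ps
  | f+1, ps, pd =>
    let r := ps.foldl (preSetStep traj) (ps, pd)
    if PySem.Set.equal (PySem.Set.union r.1 (PySem.Set.ofList [state])) r.2 then r.1
    else preSetLoop traj state f r.1 r.2

def pre_set (state : List Int) (ell_seq_trajectory : List (List Int)) : List (List Int) :=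
  preSetLoop ell_seq_trajectory state (ell_seq_trajectory.length + 2)
    (preA state ell_seq_trajectory) (PySem.Set.ofList [state])

-- ===== PORT B =====
def buildIndex (traj : List (List Int)) : PySem.Dict (List Int) (List (List Int)) :=
  traj.foldl
    (fun index s =>
      PySem.Dict.modify index (PySem.List.slice s (some 1) none) [] (fun l => l ++ [s]))
    PySem.Dict.empty

def bfsPush (p : List (List Int) × List (List Int)) (s : List Int) :
    List (List Int) × List (List Int) :=
  if PySem.Set.contains p.2 s then p else (p.1 ++ [s], PySem.Set.add p.2 s)

def bfsLoop (index : PySem.Dict (List Int) (List (List Int))) :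
    Nat → List (List Int) → List (List Int) → Nat → List (List Int)
  | 0, out, _, _ => out
  | f+1, out, seen, i =>
    if h : i < out.length then
      let r := (PySem.Dict.getD index (PySem.List.slice out[i] none (some (-1))) []).foldl
        bfsPush (out, seen)
      bfsLoop index f r.1 r.2 (i+1)
    else out

def pre_set_alt (state : List Int) (ell_seq_trajectory : List (List Int)) : List (List Int) :=
  let index := buildIndex ell_seq_trajectory
  let p := (PySem.Dict.getD index (PySem.List.slice state none (some (-1))) []).foldl
    bfsPush ([], PySem.Set.empty)
  PySem.Set.ofList (bfsLoop index (ell_seq_trajectory.length + 1) p.1 p.2 0)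


-- ===== PRECONDITION & SPEC =====
def Spec_pre_set (state : List Int) (ell_seq_trajectory : List (List Int)) (out : List (List Int)) : Prop := out = pre_set_alt state ell_seq_trajectory
instance (state : List Int) (ell_seq_trajectory : List (List Int)) (out : List (List Int)) : Decidable (Spec_pre_set state ell_seq_trajectory out) := by unfold Spec_pre_set; infer_instance

-- ===== CLAIM (what is proved, stated in full; the proofs are below) =====
def Claim_equal_pre_set : Prop := ∀ (state : List Int) (ell_seq_trajectory : List (List Int)), Dom_pre_set state ell_seq_trajectory → Spec_pre_set state ell_seq_trajectory (pre_set state ell_seq_trajectory)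

-- ===== LEMMAS AND PROOFS =====

def predsOf (traj : List (List Int)) (v : List Int) : List (List Int) :=
  traj.filter (fun s => decide (s.tail = v.dropLast))

def expandOut (traj : List (List Int)) (out : List (List Int)) (v : List Int) : List (List Int) :=
  PySem.Set.update out (predsOf traj v)

def canon (traj : List (List Int)) : Nat → List (List Int) → Nat → List (List Int)
  | 0, out, _ => out
  | f+1, out, i =>
    if h : i < out.length then canon traj f (expandOut traj out out[i]) (i+1) else out

theorem slicePref (v : List Int) :
    PySem.List.slice v none (some ((v.length : Int) - 1)) = v.dropLast := by
  cases v with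
  | nil =>
      have h : ((([] : List Int).length : Int) - 1) = (-1 : Int) := by simp
      rw [h, PySem.List.slice_to_neg_one]
  | cons a t =>
      have h : (((a :: t).length : Int) - 1) = ((t.length : Nat) : Int) := by
        simp [List.length_cons]
      rw [h, PySem.List.slice_to_natCast, List.dropLast_eq_take]
      simp

theorem foldl_split {α β : Type} (g : β → α → β) (i : Nat) (a : β) (l : List α) :
    List.foldl g a l = List.foldl g (List.foldl g a (l.take i)) (l.drop i) := by
  rw [← List.foldl_append, List.take_append_drop]

theorem contains_false_of_not_mem {s : PySem.Set (List Int)} {x : List Int} (h : x ∉ s) :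
    PySem.Set.contains s x = false := by
  rcases hc : PySem.Set.contains s x with _ | _
  · rfl
  · exact absurd ((PySem.Set.contains_iff s x).mp hc) h

theorem preA_eq (v : List Int) (traj : List (List Int)) :
    preA v traj = List.foldl PySem.Set.add [] (predsOf traj v) := by
  unfold preA predsOf
  rw [PySem.List.foldl_congr_mem traj _
    (fun pre_state s => if s.tail = v.dropLast then PySem.Set.add pre_state s else pre_state)
    PySem.Set.empty
    (by intro acc s _; rw [PySem.List.slice_from_one, slicePref])]
  show List.foldl _ ([] : List (List Int)) traj = _
  generalize ([] : List (List Int)) = acc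
  induction traj generalizing acc with
  | nil => rfl
  | cons x r ih =>
      by_cases hx : x.tail = v.dropLast
      · simp only [List.foldl_cons, List.filter_cons, hx, if_pos, decide_true]
        exact ih _
      · simp only [List.foldl_cons, List.filter_cons, hx, decide_false]
        exact ih _

theorem update_add (s t : List (List Int)) (x : List Int) :
    PySem.Set.update s (PySem.Set.add t x) = PySem.Set.add (PySem.Set.update s t) x := by
  by_cases hx : x ∈ t
  · rw [PySem.Set.add_of_mem hx, PySem.Set.add_of_mem]
    exact (PySem.Set.mem_update s t x).mpr (Or.inr hx)
  · rw [PySem.Set.add_of_not_mem hx]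
    show List.foldl PySem.Set.add s (t ++ [x]) = _
    rw [List.foldl_append]
    rfl

theorem update_foldl_add (l : List (List Int)) :
    ∀ (t s : List (List Int)),
      PySem.Set.update s (List.foldl PySem.Set.add t l)
        = PySem.Set.update (PySem.Set.update s t) l := by
  induction l with
  | nil => intro t s; rfl
  | cons x r ih =>
      intro t s
      show PySem.Set.update s (List.foldl PySem.Set.add (PySem.Set.add t x) r) = _
      rw [ih (PySem.Set.add t x) s, update_add]
      rfl

theorem union_preA (ps : List (List Int)) (v : List Int) (X : List (List Int)) :
    PySem.Set.union ps (preA v X) = PySem.Set.update ps (predsOf X v) := by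
  show PySem.Set.update ps (preA v X) = _
  rw [preA_eq, update_foldl_add]
  rfl
theorem update_filter_not_contains (p : List Int → Bool) :
    ∀ (X ps qs : List (List Int)), (∀ x, x ∈ ps → x ∈ qs) →
      PySem.Set.update qs ((X.filter (fun x => !PySem.Set.contains ps x)).filter p)
        = PySem.Set.update qs (X.filter p) := by
  intro X
  induction X with
  | nil => intro ps qs _; rfl
  | cons x r ih =>
      intro ps qs hpq
      by_cases hc : x ∈ ps
      · rw [List.filter_cons, if_neg (by simp; exact hc)]
        by_cases hp : p x = true
        · rw [List.filter_cons (p := p), if_pos hp]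
          show _ = List.foldl PySem.Set.add (PySem.Set.add qs x) (r.filter p)
          rw [PySem.Set.add_of_mem (hpq x hc)]
          exact ih ps qs hpq
        · rw [List.filter_cons (p := p), if_neg hp]
          exact ih ps qs hpq
      · rw [List.filter_cons, if_pos (by simp; exact hc)]
        by_cases hp : p x = true
        · rw [List.filter_cons, if_pos hp, List.filter_cons, if_pos hp]
          show List.foldl PySem.Set.add (PySem.Set.add qs x) _
              = List.foldl PySem.Set.add (PySem.Set.add qs x) (r.filter p)
          exact ih ps (PySem.Set.add qs x)
            (fun y hy => (PySem.Set.mem_add qs x y).mpr (Or.inl (hpq y hy)))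
        · rw [List.filter_cons, if_neg hp, List.filter_cons, if_neg hp]
          exact ih ps qs hpq

theorem diff_eq_filter (traj ps : List (List Int)) :
    PySem.Set.diff traj ps = traj.filter (fun x => !PySem.Set.contains ps x) := rfl

theorem predsOf_filter (X : List (List Int)) (q : List Int → Bool) (v : List Int) :
    predsOf (X.filter q) v = (X.filter q).filter (fun s => decide (s.tail = v.dropLast)) := rfl

theorem stepA_eq (traj ps pd : List (List Int)) (s : List Int) :
    preSetStep traj (ps, pd) s
      = if PySem.Set.contains pd s then (ps, pd)
        else (expandOut traj ps s, PySem.Set.add pd s) := by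
  unfold preSetStep
  by_cases hc : PySem.Set.contains pd s = true
  · rw [if_pos hc, if_pos hc]
  · rw [if_neg hc, if_neg hc]
    refine Prod.ext ?_ rfl
    show PySem.Set.union ps (preA s (PySem.Set.diff traj ps)) = expandOut traj ps s
    rw [union_preA, diff_eq_filter, predsOf_filter,
      update_filter_not_contains _ traj ps ps (fun _ h => h)]
    rfl
theorem bool_eq_of_iff {a b : Bool} (h : a = true ↔ b = true) : a = b := by
  rcases a <;> rcases b <;> simp_all

theorem passA (traj : List (List Int)) :
    ∀ (l ps pd : List (List Int)), l.Nodup →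
      List.foldl (preSetStep traj) (ps, pd) l
        = (l.foldl (fun a s => if PySem.Set.contains pd s then a else expandOut traj a s) ps,
           PySem.Set.update pd l) := by
  intro l
  induction l with
  | nil => intro ps pd _; rfl
  | cons s r ih =>
      intro ps pd hnd
      have hsr : s ∉ r := (List.nodup_cons.mp hnd).1
      have hr : r.Nodup := (List.nodup_cons.mp hnd).2
      rw [List.foldl_cons, stepA_eq]
      by_cases hc : PySem.Set.contains pd s = true
      · have hmem : s ∈ pd := (PySem.Set.contains_iff pd s).mp hc
        rw [if_pos hc, ih ps pd hr]
        simp only [List.foldl_cons]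
        rw [if_pos hc]
        show _ = (_, PySem.Set.update (PySem.Set.add pd s) r)
        rw [PySem.Set.add_of_mem hmem]
      · rw [if_neg hc]
        rw [ih (expandOut traj ps s) (PySem.Set.add pd s) hr]
        simp only [List.foldl_cons]
        rw [if_neg hc]
        have hnm : s ∉ pd := fun h => hc ((PySem.Set.contains_iff pd s).mpr h)
        have hcongr : ∀ (a : List (List Int)), ∀ x ∈ r,
            (if PySem.Set.contains (PySem.Set.add pd s) x then a else expandOut traj a x)
              = (if PySem.Set.contains pd x then a else expandOut traj a x) := by
          intro a x hx
          have : PySem.Set.contains (PySem.Set.add pd s) x = PySem.Set.contains pd x := by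
            apply bool_eq_of_iff
            rw [PySem.Set.contains_iff, PySem.Set.contains_iff, PySem.Set.mem_add]
            constructor
            · rintro (h | h)
              · exact h
              · exact absurd (h ▸ hx) hsr
            · exact Or.inl
          rw [this]
        rw [PySem.List.foldl_congr_mem r _ _ _ hcongr]
        rfl

theorem foldl_skip (traj : List (List Int)) (pd : List (List Int)) :
    ∀ (l : List (List Int)) (a : List (List Int)), (∀ x ∈ l, PySem.Set.contains pd x = true) →
      l.foldl (fun a s => if PySem.Set.contains pd s then a else expandOut traj a s) a = a := by
  intro l
  induction l with
  | nil => intro a _; rfl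
  | cons x r ih =>
      intro a h
      rw [List.foldl_cons, if_pos (h x List.mem_cons_self)]
      exact ih a (fun y hy => h y (List.mem_cons_of_mem x hy))

theorem update_of_subset {l s : List (List Int)} (h : ∀ x ∈ l, x ∈ s) :
    PySem.Set.update s l = s := by
  induction l with
  | nil => rfl
  | cons x r ih =>
      show PySem.Set.update (PySem.Set.add s x) r = s
      rw [PySem.Set.add_of_mem (h x List.mem_cons_self)]
      exact ih (fun y hy => h y (List.mem_cons_of_mem x hy))


theorem canon_succ (traj : List (List Int)) (f : Nat) (out : List (List Int)) (i : Nat) :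
    canon traj (f+1) out i
      = if h : i < out.length then canon traj f (expandOut traj out (out[i]'h)) (i+1) else out := rfl
theorem mem_expandOut (traj out : List (List Int)) (v x : List Int) :
    x ∈ expandOut traj out v ↔ x ∈ out ∨ x ∈ predsOf traj v := PySem.Set.mem_update _ _ _

theorem expandOut_noop {traj out : List (List Int)} {v : List Int}
    (h : ∀ x ∈ predsOf traj v, x ∈ out) : expandOut traj out v = out := update_of_subset h

theorem foldl_state_noop (traj : List (List Int)) (state : List Int) :
    ∀ (suf : List (List Int)) (a : List (List Int)), (∀ x ∈ predsOf traj state, x ∈ a) →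
      suf.foldl (fun a s => if s = state then a else expandOut traj a s) a
        = suf.foldl (expandOut traj) a := by
  intro suf
  induction suf with
  | nil => intro a _; rfl
  | cons s r ih =>
      intro a h
      by_cases hs : s = state
      · rw [List.foldl_cons, if_pos hs, List.foldl_cons, hs, expandOut_noop h]
        exact ih a h
      · rw [List.foldl_cons, if_neg hs, List.foldl_cons]
        exact ih _ (fun x hx => (mem_expandOut traj a s x).mpr (Or.inl (h x hx)))

theorem prefix_update (l s : List (List Int)) : s <+: PySem.Set.update s l := by
  induction l generalizing s with
  | nil => exact List.prefix_refl s
  | cons x r ih =>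
      show s <+: PySem.Set.update (PySem.Set.add s x) r
      refine List.IsPrefix.trans ?_ (ih (PySem.Set.add s x))
      rw [PySem.Set.add_eq_ite]
      by_cases hx : x ∈ s
      · rw [if_pos hx]
      · rw [if_neg hx]; exact List.prefix_append s [x]

theorem prefix_foldl_expand (traj : List (List Int)) :
    ∀ (suf out : List (List Int)), out <+: suf.foldl (expandOut traj) out := by
  intro suf
  induction suf with
  | nil => intro out; exact List.prefix_refl out
  | cons v r ih =>
      intro out
      exact List.IsPrefix.trans (prefix_update _ out) (ih (expandOut traj out v))

theorem mem_foldl_expand (traj : List (List Int)) :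
    ∀ (suf out : List (List Int)) (x : List Int),
      x ∈ suf.foldl (expandOut traj) out → x ∈ out ∨ x ∈ traj := by
  intro suf
  induction suf with
  | nil => intro out x h; exact Or.inl h
  | cons v r ih =>
      intro out x h
      rcases ih (expandOut traj out v) x h with h1 | h1
      · rcases (mem_expandOut traj out v x).mp h1 with h2 | h2
        · exact Or.inl h2
        · exact Or.inr (List.mem_of_mem_filter h2)
      · exact Or.inr h1

theorem nodup_foldl_expand (traj : List (List Int)) :
    ∀ (suf out : List (List Int)), out.Nodup → (suf.foldl (expandOut traj) out).Nodup := by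
  intro suf
  induction suf with
  | nil => intro out h; exact h
  | cons v r ih =>
      intro out h
      exact ih _ (PySem.Set.nodup_update out _ h)

theorem canon_ge (traj : List (List Int)) :
    ∀ (f : Nat) (out : List (List Int)) (i : Nat), out.length ≤ i → canon traj f out i = out := by
  intro f out i h
  cases f with
  | zero => rfl
  | succ g => exact dif_neg (by omega)

theorem length_le_of_nodup_subset {l l' : List (List Int)} (h : l.Nodup) (hs : ∀ x ∈ l, x ∈ l') :
    l.length ≤ l'.length := by
  have h1 := List.toFinset_card_le l'
  have h2 := List.toFinset_card_of_nodup h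
  have h3 : l.toFinset ⊆ l'.toFinset := by
    intro x hx
    simp only [List.mem_toFinset] at hx ⊢
    exact hs x hx
  have h4 := Finset.card_le_card h3
  omega

theorem canon_chunk (traj : List (List Int)) :
    ∀ (suf : List (List Int)) (f : Nat) (out : List (List Int)) (i : Nat),
      (out.drop i).take suf.length = suf →
      canon traj (suf.length + f) out i
        = canon traj f (suf.foldl (expandOut traj) out) (i + suf.length) := by
  intro suf
  induction suf with
  | nil => intro f out i _; simp
  | cons v r ih =>
      intro f out i h
      rcases hd : out.drop i with _ | ⟨w, rest⟩
      · rw [hd] at h; simp at h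
      · rw [hd] at h
        rw [List.length_cons, List.take_succ_cons] at h
        have hw : w = v := (List.cons.injEq _ _ _ _).mp h |>.1
        have hrest : rest.take r.length = r := (List.cons.injEq _ _ _ _).mp h |>.2
        have hi : i < out.length := by
          by_contra hle
          have : out.drop i = [] := List.drop_eq_nil_iff.mpr (by omega)
          rw [this] at hd; exact absurd hd (by simp)
        have hrest' : rest = out.drop (i+1) := by
          rw [← List.tail_drop, hd]; rfl
        have hv : out[i] = v := by
          have h0 : (List.drop i out)[0]'(by rw [hd]; simp) = w := by simp [hd]
          rw [List.getElem_drop] at h0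
          simp only [Nat.add_zero] at h0
          rw [h0, hw]
        have hfuel : (v :: r).length + f = (r.length + f) + 1 := by
          simp [List.length_cons]; omega
        rw [hfuel]
        show (if h : i < out.length then
            canon traj (r.length + f) (expandOut traj out out[i]) (i+1) else out) = _
        rw [dif_pos hi, hv]
        have hlenrest : r.length ≤ rest.length := by
          have := congrArg List.length hrest
          simp at this
          omega
        have hpre : out <+: expandOut traj out v := prefix_update _ out
        obtain ⟨e, he⟩ := hpre
        have hnext : ((expandOut traj out v).drop (i+1)).take r.length = r := by
          rw [← he, List.drop_append_of_le_length (by omega),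
            List.take_append_of_le_length (by rw [← hrest']; omega), ← hrest', hrest]
        rw [ih f (expandOut traj out v) (i+1) hnext]
        have : i + (v :: r).length = (i+1) + r.length := by simp; omega
        rw [this]
        rfl
theorem loopA_eq_canon (traj : List (List Int)) (state : List Int) :
    ∀ (fA fC : Nat) (ps pd : List (List Int)) (i : Nat),
      ps.Nodup →
      i ≤ ps.length →
      (∀ x, PySem.Set.contains pd x = true ↔ (x = state ∨ x ∈ ps.take i)) →
      (∀ x ∈ predsOf traj state, x ∈ ps) →
      (∀ x ∈ ps, x ∈ traj) →
      traj.length - i < fA →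
      traj.length - i < fC →
      preSetLoop traj state fA ps pd = canon traj fC ps i := by
  intro fA
  induction fA with
  | zero => intro fC ps pd i _ _ _ _ _ hfa _; omega
  | succ fA ih =>
      intro fC ps pd i hnd hi hchar hpreds hsub hfa hfc
      have hlenps : ps.length ≤ traj.length := length_le_of_nodup_subset hnd hsub
      have hdisj : ∀ a ∈ ps.take i, ∀ b ∈ ps.drop i, a ≠ b := by
        have h := hnd
        rw [← List.take_append_drop i ps] at h
        exact (List.nodup_append.mp h).2.2
      have hfoldA : ps.foldl
            (fun a s => if PySem.Set.contains pd s then a else expandOut traj a s) ps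
          = (ps.drop i).foldl (expandOut traj) ps := by
        rw [foldl_split _ i,
          foldl_skip traj pd (ps.take i) ps
            (fun x hx => (hchar x).mpr (Or.inr hx))]
        rw [PySem.List.foldl_congr_mem (ps.drop i) _
          (fun a s => if s = state then a else expandOut traj a s) ps
          (by
            intro a x hx
            show (if PySem.Set.contains pd x then a else expandOut traj a x)
                = (if x = state then a else expandOut traj a x)
            by_cases hs : x = state
            · rw [if_pos ((hchar x).mpr (Or.inl hs)), if_pos hs]
            · have hcf : PySem.Set.contains pd x = false := by
                rcases hcx : PySem.Set.contains pd x with _ | _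
                · rfl
                · rcases (hchar x).mp hcx with h | h
                  · exact absurd h hs
                  · exact absurd rfl (hdisj x h x hx)
              rw [hcf, if_neg hs]
              simp)]
        exact foldl_state_noop traj state (ps.drop i) ps hpreds
      obtain ⟨e, he⟩ := prefix_foldl_expand traj (ps.drop i) ps
      set suf := ps.drop i with hsufdef
      set ps' := suf.foldl (expandOut traj) ps with hps'def
      have hnd' : ps'.Nodup := nodup_foldl_expand traj suf ps hnd
      have hsub' : ∀ x ∈ ps', x ∈ traj := fun x hx =>
        (mem_foldl_expand traj suf ps x hx).elim (hsub x) id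
      have hlen' : ps'.length ≤ traj.length := length_le_of_nodup_subset hnd' hsub'
      have hlenge : ps.length ≤ ps'.length := by
        rw [← he, List.length_append]; omega
      have hdisj_e : ∀ x ∈ e, x ∉ ps := by
        intro x hx hxps
        have h := hnd'
        rw [← he] at h
        exact (List.nodup_append.mp h).2.2 x hxps x hx rfl
      have hmemU : ∀ x, x ∈ PySem.Set.union ps' (PySem.Set.ofList [state])
          ↔ (x ∈ ps' ∨ x = state) := by
        intro x
        show x ∈ PySem.Set.update ps' _ ↔ _
        rw [PySem.Set.mem_update, PySem.Set.mem_ofList]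
        simp
      have hmemD : ∀ x, x ∈ PySem.Set.update pd ps ↔ (x = state ∨ x ∈ ps) := by
        intro x
        rw [PySem.Set.mem_update]
        constructor
        · rintro (h | h)
          · rcases (hchar x).mp ((PySem.Set.contains_iff pd x).mpr h) with h1 | h1
            · exact Or.inl h1
            · exact Or.inr (List.take_subset i ps h1)
          · exact Or.inr h
        · rintro (h | h)
          · exact Or.inl ((PySem.Set.contains_iff pd x).mp ((hchar x).mpr (Or.inl h)))
          · exact Or.inr h
      have hCiff : (PySem.Set.equal (PySem.Set.union ps' (PySem.Set.ofList [state]))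
            (PySem.Set.update pd ps) = true) ↔ (∀ x ∈ e, x = state) := by
        rw [PySem.Set.equal_iff]
        constructor
        · intro hq x hx
          have hxps' : x ∈ ps' := by rw [← he]; exact List.mem_append_right ps hx
          rcases (hmemD x).mp ((hq x).mp ((hmemU x).mpr (Or.inl hxps'))) with h | h
          · exact h
          · exact absurd h (hdisj_e x hx)
        · intro hall x
          rw [hmemU, hmemD, ← he, List.mem_append]
          constructor
          · rintro ((h | h) | h)
            · exact Or.inr h
            · exact Or.inl (hall x h)
            · exact Or.inl h
          · rintro (h | h)
            · exact Or.inr h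
            · exact Or.inl (Or.inl h)
      have hsuflen : suf.length = ps.length - i := by rw [hsufdef, List.length_drop]
      have hfCsplit : fC = suf.length + (fC - suf.length) := by omega
      have htake : (ps.drop i).take suf.length = suf := by
        rw [hsufdef, List.take_length]
      have hchunk : canon traj fC ps i = canon traj (fC - suf.length) ps' (i + suf.length) := by
        conv_lhs => rw [hfCsplit]
        exact canon_chunk traj suf (fC - suf.length) ps i htake
      have hidx : i + suf.length = ps.length := by omega
      rw [hidx] at hchunk
      show (let r := ps.foldl (preSetStep traj) (ps, pd);
        if PySem.Set.equal (PySem.Set.union r.1 (PySem.Set.ofList [state])) r.2 then r.1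
        else preSetLoop traj state fA r.1 r.2) = canon traj fC ps i
      rw [passA traj ps ps pd hnd]
      simp only [hfoldA]
      rw [hchunk]
      by_cases hC : PySem.Set.equal (PySem.Set.union ps' (PySem.Set.ofList [state]))
          (PySem.Set.update pd ps) = true
      · rw [if_pos hC]
        have hall := hCiff.mp hC
        cases e with
        | nil =>
            have hpse : ps' = ps := by simpa using he.symm
            rw [canon_ge traj _ ps' ps.length (le_of_eq (by rw [hpse]))]
        | cons a e' =>
            cases e' with
            | cons b t =>
                exfalso
                have ha : a = state := hall a List.mem_cons_self
                have hb : b = state := hall b (List.mem_cons_of_mem a List.mem_cons_self)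
                have h := hnd'
                rw [← he] at h
                have hae := (List.nodup_append.mp h).2.1
                have : a ∉ b :: t := (List.nodup_cons.mp hae).1
                exact this (by rw [ha, hb]; exact List.mem_cons_self)
            | nil =>
                have ha : a = state := hall a List.mem_cons_self
                have hps'' : ps' = ps ++ [a] := he.symm
                rcases hgf : fC - suf.length with _ | g
                · omega
                · have hlt : ps.length < ps'.length := by
                    rw [hps'', List.length_append]; simp
                  show ps' = canon traj (g+1) ps' ps.length
                  rw [show canon traj (g+1) ps' ps.length
                      = canon traj g (expandOut traj ps' (ps'[ps.length]'hlt)) (ps.length+1)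
                    from dif_pos hlt]
                  have hget : ps'[ps.length]'hlt = a := by
                    simp [hps'']
                  rw [hget]
                  have hnoop : expandOut traj ps' a = ps' :=
                    expandOut_noop (fun x hx => by
                      rw [← he]
                      exact List.mem_append_left _ (hpreds x (by rw [ha] at hx; exact hx)))
                  rw [hnoop, canon_ge traj g ps' (ps.length+1)
                    (by rw [hps'', List.length_append]; simp)]
      · rw [if_neg hC]
        have hi_lt : i < ps.length := by
          rcases Nat.lt_or_ge i ps.length with h | h
          · exact h
          · exfalso
            have hsufnil : suf = [] := by
              rw [hsufdef]; exact List.drop_eq_nil_iff.mpr h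
            have hpse : ps' = ps := by rw [hps'def, hsufnil]; rfl
            have henil : e = [] := by
              have h2 : ps ++ e = ps := by rw [he, hpse]
              simpa using h2
            exact hC (hCiff.mpr (by rw [henil]; intro x hx; simp at hx))
        apply ih (fC - suf.length) ps' (PySem.Set.update pd ps) ps.length hnd' hlenge
        · intro x
          rw [PySem.Set.contains_iff, hmemD x,
            show ps'.take ps.length = ps by rw [← he, List.take_left]]
        · intro x hx
          rw [← he]; exact List.mem_append_left _ (hpreds x hx)
        · exact hsub'
        · omega
        · omega
theorem getD_buildIndex (traj : List (List Int)) (k : List Int) :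
    PySem.Dict.getD (buildIndex traj) k []
      = traj.filter (fun s => decide (s.tail = k)) := by
  induction traj using List.reverseRecOn generalizing k with
  | nil => rfl
  | append_singleton t s ih =>
      unfold buildIndex
      rw [List.foldl_concat]
      show PySem.Dict.getD (PySem.Dict.modify (buildIndex t)
        (PySem.List.slice s (some 1) none) [] (fun l => l ++ [s])) k [] = _
      rw [PySem.List.slice_from_one]
      show PySem.Dict.getD ((buildIndex t).insert s.tail
        (PySem.Dict.getD (buildIndex t) s.tail [] ++ [s])) k [] = _
      rw [List.filter_append]
      by_cases hk : k = s.tail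
      · unfold PySem.Dict.getD
        rw [hk, PySem.Dict.get?_insert_self]
        show PySem.Dict.getD (buildIndex t) s.tail [] ++ [s] = _
        rw [ih]
        simp
      · unfold PySem.Dict.getD
        rw [PySem.Dict.get?_insert_of_ne _ _ hk]
        show PySem.Dict.getD (buildIndex t) k [] = _
        rw [ih]
        have : (decide (s.tail = k)) = false := by
          simp only [decide_eq_false_iff_not]
          exact fun h => hk h.symm
        simp [this]

theorem bfsPush_pair :
    ∀ (l out : List (List Int)),
      l.foldl bfsPush (out, out) = (PySem.Set.update out l, PySem.Set.update out l) := by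
  intro l
  induction l with
  | nil => intro out; rfl
  | cons s r ih =>
      intro out
      rw [List.foldl_cons]
      by_cases hs : s ∈ out
      · have hc : PySem.Set.contains out s = true := (PySem.Set.contains_iff out s).mpr hs
        show List.foldl bfsPush (if PySem.Set.contains out s then (out, out) else _) r = _
        rw [if_pos hc, ih out]
        show _ = (PySem.Set.update (PySem.Set.add out s) r, PySem.Set.update (PySem.Set.add out s) r)
        rw [PySem.Set.add_of_mem hs]
      · have hc : PySem.Set.contains out s = false := contains_false_of_not_mem hs
        show List.foldl bfsPush (if PySem.Set.contains out s then (out, out)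
            else (out ++ [s], PySem.Set.add out s)) r = _
        rw [hc, PySem.Set.add_of_not_mem hs]
        show List.foldl bfsPush (out ++ [s], out ++ [s]) r = _
        rw [ih (out ++ [s])]
        show _ = (PySem.Set.update (PySem.Set.add out s) r, PySem.Set.update (PySem.Set.add out s) r)
        rw [PySem.Set.add_of_not_mem hs]

theorem bfsLoop_eq_canon (traj : List (List Int)) :
    ∀ (f : Nat) (out i : _), bfsLoop (buildIndex traj) f out out i = canon traj f out i := by
  intro f
  induction f with
  | zero => intro out i; rfl
  | succ g ih =>
      intro out i
      by_cases h : i < out.length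
      · show (if h : i < out.length then _ else out) = canon traj (g+1) out i
        rw [dif_pos h]
        show (let r := (PySem.Dict.getD (buildIndex traj)
            (PySem.List.slice (out[i]'h) none (some (-1))) []).foldl bfsPush (out, out);
          bfsLoop (buildIndex traj) g r.1 r.2 (i+1)) = _
        rw [PySem.List.slice_to_neg_one, getD_buildIndex, bfsPush_pair]
        show bfsLoop (buildIndex traj) g (expandOut traj out (out[i]'h))
          (expandOut traj out (out[i]'h)) (i+1) = _
        rw [ih]
        rw [canon_succ, dif_pos h]
      · show (if h : i < out.length then _ else out) = canon traj (g+1) out i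
        rw [dif_neg h]
        exact (canon_ge traj (g+1) out i (by omega)).symm

theorem foldl_add_disjoint :
    ∀ (l acc : List (List Int)), l.Nodup → (∀ x ∈ l, x ∉ acc) →
      List.foldl PySem.Set.add acc l = acc ++ l := by
  intro l
  induction l with
  | nil => intro acc _ _; simp
  | cons x r ih =>
      intro acc hnd hdis
      rw [List.foldl_cons, PySem.Set.add_of_not_mem (hdis x List.mem_cons_self)]
      rw [ih (acc ++ [x]) (List.nodup_cons.mp hnd).2]
      · simp
      · intro y hy
        rw [List.mem_append]
        rintro (h | h)
        · exact hdis y (List.mem_cons_of_mem x hy) h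
        · have : y = x := by simpa using h
          exact (List.nodup_cons.mp hnd).1 (this ▸ hy)

theorem ofList_of_nodup {l : List (List Int)} (h : l.Nodup) : PySem.Set.ofList l = l := by
  rw [PySem.Set.ofList_eq_foldl, foldl_add_disjoint l [] h (by simp)]
  simp

theorem canon_nodup (traj : List (List Int)) :
    ∀ (f : Nat) (out : List (List Int)) (i : Nat), out.Nodup → (canon traj f out i).Nodup := by
  intro f
  induction f with
  | zero => intro out i h; exact h
  | succ g ih =>
      intro out i h
      by_cases hlt : i < out.length
      · show (if h : i < out.length then _ else out).Nodup
        rw [dif_pos hlt]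
        exact ih _ _ (PySem.Set.nodup_update out _ h)
      · show (if h : i < out.length then _ else out).Nodup
        rw [dif_neg hlt]
        exact h
theorem main_eq (state : List Int) (traj : List (List Int)) :
    pre_set state traj = pre_set_alt state traj := by
  have hnd0 : (List.foldl PySem.Set.add [] (predsOf traj state)).Nodup := by
    rw [← PySem.Set.ofList_eq_foldl]; exact PySem.Set.nodup_ofList _
  have hA : pre_set state traj
      = canon traj (traj.length + 1) (List.foldl PySem.Set.add [] (predsOf traj state)) 0 := by
    unfold pre_set
    rw [preA_eq state traj]
    apply loopA_eq_canon traj state (traj.length+2) (traj.length+1) _ _ 0 hnd0 (Nat.zero_le _)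
    · intro x
      rw [PySem.Set.contains_iff]
      constructor
      · intro h
        have : x ∈ [state] := by
          have h2 : PySem.Set.ofList [state] = [state] := rfl
          rw [h2] at h; exact h
        exact Or.inl (by simpa using this)
      · rintro (h | h)
        · rw [h]; exact List.mem_cons_self
        · simp at h
    · intro x hx
      rw [← PySem.Set.ofList_eq_foldl]
      exact (PySem.Set.mem_ofList _ x).mpr hx
    · intro x hx
      rw [← PySem.Set.ofList_eq_foldl] at hx
      exact List.mem_of_mem_filter ((PySem.Set.mem_ofList _ x).mp hx)
    · omega
    · omega
  have hB : pre_set_alt state traj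
      = PySem.Set.ofList
          (canon traj (traj.length + 1) (List.foldl PySem.Set.add [] (predsOf traj state)) 0) := by
    show PySem.Set.ofList (bfsLoop (buildIndex traj) (traj.length + 1)
        ((PySem.Dict.getD (buildIndex traj) (PySem.List.slice state none (some (-1))) []).foldl
          bfsPush ([], PySem.Set.empty)).1
        ((PySem.Dict.getD (buildIndex traj) (PySem.List.slice state none (some (-1))) []).foldl
          bfsPush ([], PySem.Set.empty)).2 0)
      = _
    rw [PySem.List.slice_to_neg_one, getD_buildIndex]
    rw [show (([], PySem.Set.empty) : List (List Int) × List (List Int))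
        = (([] : List (List Int)), ([] : List (List Int))) from rfl]
    rw [bfsPush_pair (traj.filter (fun s => decide (s.tail = state.dropLast))) []]
    show PySem.Set.ofList (bfsLoop (buildIndex traj) (traj.length + 1)
        (PySem.Set.update [] (predsOf traj state)) (PySem.Set.update [] (predsOf traj state)) 0) = _
    rw [bfsLoop_eq_canon]
    rfl
  rw [hA, hB, ofList_of_nodup (canon_nodup traj (traj.length + 1) _ 0 hnd0)]

-- ===== VERDICT (by name: the statement is the Claim_ definition above) =====
theorem pre_set_spec : Claim_equal_pre_set := by
  intro state ell_seq_trajectory _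
  exact main_eq state ell_seq_trajectory
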